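-- pv_equiv track=rewrite | github.com/alexanderSushin/Personal-Recommendations | bot.py | delRectBrackets
-- ===== SOURCE A (Python) =====
-- def delRectBrackets (s):
-- 	bal = 0
-- 	res = ''
-- 	for i in s:
-- 		if i == '[' or i == '(' or i == '{':
-- 			bal += 1
-- 		elif i == ']' or i == ')' or i == '}':
-- 			bal -= 1
-- 		elif bal == 0:
-- 			res += i
-- 	return res.strip()
-- ===== SOURCE B (Python) =====
-- from itertools import accumulate
--
-- def delRectBrackets(s):
--     deltas = [1 if c in '([{' else -1 if c in ')]}' else 0 for c in s]
--     pre = accumulate(deltas, initial=0)  # depth BEFORE each char (exclusive prefix sum)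
--     kept = ''.join(c for c, d in zip(s, pre) if d == 0 and c not in '([{)]}')
--     return kept.strip()
-- ===== Notes on version B (the rewrite author's own statement) =====
-- stated objective: alternative
-- what changed: Replaces A's single stateful balance-accumulator loop with an exclusive prefix-sum of bracket deltas (itertools.accumulate) followed by a separate zip-and-filter comprehension over (char, pre-depth) pairs.
import Mathlib
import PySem

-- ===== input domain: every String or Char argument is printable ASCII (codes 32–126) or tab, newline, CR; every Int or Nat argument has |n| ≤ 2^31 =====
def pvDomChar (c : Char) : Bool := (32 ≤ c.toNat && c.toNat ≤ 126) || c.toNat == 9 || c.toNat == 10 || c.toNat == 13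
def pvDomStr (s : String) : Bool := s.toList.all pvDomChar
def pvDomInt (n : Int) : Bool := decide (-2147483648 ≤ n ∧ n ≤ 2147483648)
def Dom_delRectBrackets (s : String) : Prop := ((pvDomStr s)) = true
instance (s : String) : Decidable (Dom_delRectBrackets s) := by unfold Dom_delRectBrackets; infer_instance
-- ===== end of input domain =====

-- B replaces A's single stateful balance loop by an exclusive prefix-sum of bracket deltas
-- plus a zip-and-filter pass (objective: alternative decomposition, same cost).

-- ===== PORT A =====
-- A's loop body: state (bal, res), one step per character.
def aStep (st : Int × List Char) (i : Char) : Int × List Char :=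
  if i = '[' ∨ i = '(' ∨ i = '{' then (st.1 + 1, st.2)
  else if i = ']' ∨ i = ')' ∨ i = '}' then (st.1 - 1, st.2)
  else if st.1 = 0 then (st.1, st.2 ++ [i]) else st

def delRectBrackets (s : String) : String :=
  let r := s.toList.foldl aStep ((0 : Int), ([] : List Char))
  PySem.Str.strip (String.ofList r.2)

-- ===== PORT B =====
-- delta of one character: +1 for an opener, -1 for a closer, 0 otherwise
def bDelta (c : Char) : Int :=
  if "([{".toList.contains c then 1
  else if ")]}".toList.contains c then -1 else 0

-- keep a (char, pre-depth) pair: depth 0 and not a bracket character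
def bKeep (p : Char × Int) : Bool :=
  p.2 == 0 && !("([{)]}".toList.contains p.1)

def delRectBrackets_alt (s : String) : String :=
  let deltas := s.toList.map bDelta
  let pre := deltas.scanl (· + ·) 0        -- exclusive prefix sums (accumulate with initial=0)
  let kept := ((s.toList.zip pre).filter bKeep).map Prod.fst
  PySem.Str.strip (String.ofList kept)

-- ===== PRECONDITION & SPEC =====
def Spec_delRectBrackets (s : String) (out : String) : Prop := out = delRectBrackets_alt s
instance (s : String) (out : String) : Decidable (Spec_delRectBrackets s out) := by unfold Spec_delRectBrackets; infer_instance

-- ===== CLAIM (what is proved, stated in full; the proofs are below) =====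
def Claim_equal_delRectBrackets : Prop := ∀ (s : String), Dom_delRectBrackets s → Spec_delRectBrackets s (delRectBrackets s)

-- ===== LEMMAS AND PROOFS =====
lemma key (l : List Char) : ∀ (bal : Int) (acc : List Char),
    (l.foldl aStep (bal, acc)).2
      = acc ++ ((l.zip ((l.map bDelta).scanl (· + ·) bal)).filter bKeep).map Prod.fst := by
  induction l with
  | nil => intro bal acc; simp
  | cons c l ih =>
    intro bal acc
    by_cases ho : c = '[' ∨ c = '(' ∨ c = '{'
    · have hd : bDelta c = 1 := by rcases ho with h | h | h <;> simp [h, bDelta]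
      have hk : bKeep (c, bal) = false := by
        rcases ho with h | h | h <;> simp [h, bKeep]
      simp [List.foldl, aStep, ho, hd, hk, ih]
    · by_cases hc : c = ']' ∨ c = ')' ∨ c = '}'
      · have hd : bDelta c = -1 := by
          rcases hc with h | h | h <;> simp [h, bDelta]
        have hk : bKeep (c, bal) = false := by
          rcases hc with h | h | h <;> simp [h, bKeep]
        simp [List.foldl, aStep, ho, hc, hd, hk, ih]
        ring_nf
      · have hd : bDelta c = 0 := by
          simp only [bDelta]
          rw [if_neg, if_neg]
          · intro h; simp at h; tauto
          · intro h; simp at h; tauto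
        by_cases hb : bal = 0
        · have hk : bKeep (c, bal) = true := by
            simp [bKeep, hb]
            push Not at ho hc
            tauto
          simp [List.foldl, aStep, ho, hc, hb, hd, ih]
          rw [List.filter_cons_of_pos (by simpa [hb] using hk)]
          simp
        · have hk : bKeep (c, bal) = false := by simp [bKeep, hb]
          simp [List.foldl, aStep, ho, hc, hb, hd, hk, ih]

-- ===== VERDICT (by name: the statement is the Claim_ definition above) =====
theorem delRectBrackets_spec : Claim_equal_delRectBrackets := by
  intro s _
  show delRectBrackets s = delRectBrackets_alt s
  simp [delRectBrackets, delRectBrackets_alt, key]
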